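-- pv_equiv track=rewrite | github.com/miliar/Code_Jam_Webscraper | solutions_python/Problem_187/704.py | solve
-- ===== SOURCE A (Python) =====
-- def party(index):
--     return chr(65 + index)
--
-- def getMaxIndex(values, length, exclude=-1):
--     maximum = 0
--     maxIndex = -1
--     for index in range(0, length):
--         if index != exclude and maximum < values[index]:
--             maximum = values[index]
--             maxIndex = index
--     return maxIndex
--
-- def solve(parties, length):
--     results = []
--     total = 0
--     for index in range(0, length):
--         total += parties[index]
--     while total > 0:
--         value1, value2 = 0, 0
--         index1 = getMaxIndex(parties, length)
--         if index1 != -1: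
--             total -= 1
--             value1 = parties[index1]
--         index2 = getMaxIndex(parties, length, index1)
--         if index2 != -1:
--             total -= 1
--             value2 = parties[index2]
--         if total == 1:
--             parties[index1] -= 1
--             results.append(party(index1))
--         elif value1 == value2:
--             parties[index1] -= 1
--             parties[index2] -= 1
--             results.append(party(index1) + party(index2))
--         elif value1 == 1:
--             parties[index1] -= 1
--             results.append(party(index1))
--         else:
--             parties[index1] -= 2
--             results.append(party(index1) + party(index1))
--     return results
-- ===== SOURCE B (Python) =====
-- def put(item, items):
--     # linear insertion keeping the list in ascending (negcount, index) order
--     k = 0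
--     while k < len(items) and (items[k][0] < item[0]
--                               or (items[k][0] == item[0] and items[k][1] < item[1])):
--         k += 1
--     return items[:k] + [item] + items[k:]
--
-- def top(items, k):
--     # k-th best party: the k-th entry of the ordered list, if it has seats left
--     if k < len(items) and items[k][0] < 0:
--         return -items[k][0], items[k][1]
--     return 0, -1
--
-- def solve(parties, length):
--     # keep (-count, index) pairs in a list sorted ascending: the top two parties
--     # are always the first two entries; each round re-inserts the decremented
--     # entries instead of rescanning.  Does not mutate `parties` (A does).
--     items = []
--     total = 0
--     for i in range(length):
--         total += parties[i]
--         items = put((-parties[i], i), items)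
--     out = []
--     while total > 0:
--         v1, i1 = top(items, 0)
--         v2, i2 = top(items, 1)
--         total -= (i1 != -1) + (i2 != -1)
--         if total == 1:
--             items = put((1 - v1, i1), items[1:])
--             out.append(chr(65 + i1))
--         elif v1 == v2:
--             items = put((1 - v1, i1), put((1 - v2, i2), items[2:]))
--             out.append(chr(65 + i1) + chr(65 + i2))
--         elif v1 == 1:
--             items = put((1 - v1, i1), items[1:])
--             out.append(chr(65 + i1))
--         else:
--             items = put((2 - v1, i1), items[1:])
--             out.append(chr(65 + i1) + chr(65 + i1))
--     return out
-- ===== Notes on version B (the rewrite author's own statement) =====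
-- stated objective: alternative
-- what changed: A rescans the whole prefix twice per round (getMaxIndex with and without an exclude); B never scans during the loop: it keeps the parties as (-count, index) pairs in an ordered list built once up front, reads the top two parties at the head each round and restores the order by a single linear insertion of the decremented entries, and works on a copy instead of mutating the caller's list.
import Mathlib
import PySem

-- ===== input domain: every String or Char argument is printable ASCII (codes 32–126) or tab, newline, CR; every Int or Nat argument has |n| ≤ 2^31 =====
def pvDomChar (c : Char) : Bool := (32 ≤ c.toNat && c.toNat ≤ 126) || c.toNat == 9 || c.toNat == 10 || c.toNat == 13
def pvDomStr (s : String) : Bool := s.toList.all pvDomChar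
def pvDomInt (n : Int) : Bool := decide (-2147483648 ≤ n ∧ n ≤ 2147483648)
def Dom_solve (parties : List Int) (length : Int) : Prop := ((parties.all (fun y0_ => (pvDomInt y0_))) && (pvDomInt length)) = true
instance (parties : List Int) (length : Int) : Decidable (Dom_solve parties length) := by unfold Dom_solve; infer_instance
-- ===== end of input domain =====

-- B keeps the parties as a list of (-count, index) pairs maintained in ascending order, so each
-- round reads its top two parties at the head and re-inserts the decremented entries, instead of
-- A's two full argmax scans per round (alternative data structure, same asymptotic cost).
-- A mutates `parties` in place, B does not; the equivalence proved is about the return value.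

-- ===== PORT A =====

-- chr(65 + index); exact for the label indices that occur here (0 ≤ 65+index < 0xD800)
def party (index : Int) : String := String.ofList [Char.ofNat (65 + index).toNat]

-- xs[i] -= k  (Python in-place update, negative index wraps; exact while i is a valid index)
def decAt (xs : List Int) (i : Int) (k : Int) : List Int :=
  PySem.List.pySetD xs i (PySem.List.pyGetD xs i 0 - k)

def getMaxIndex (values : List Int) (length : Int) (exclude : Int) : Int :=
  ((PySem.List.pyRange 0 length 1).foldl
    (fun (st : Int × Int) index =>
      if index ≠ exclude ∧ st.1 < PySem.List.pyGetD values index 0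
      then (PySem.List.pyGetD values index 0, index) else st)
    (0, -1)).2

def solveLoopA (length : Int) (parties : List Int) (total : Int) (results : List String) :
    Nat → List String
  | 0 => results
  | fuel + 1 =>
    if total > 0 then
      let index1 := getMaxIndex parties length (-1)
      let total1 := if index1 ≠ -1 then total - 1 else total
      let value1 := if index1 ≠ -1 then PySem.List.pyGetD parties index1 0 else 0
      let index2 := getMaxIndex parties length index1
      let total2 := if index2 ≠ -1 then total1 - 1 else total1
      let value2 := if index2 ≠ -1 then PySem.List.pyGetD parties index2 0 else 0
      if total2 = 1 then
        solveLoopA length (decAt parties index1 1) total2 (results ++ [party index1]) fuel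
      else if value1 = value2 then
        solveLoopA length (decAt (decAt parties index1 1) index2 1) total2
          (results ++ [party index1 ++ party index2]) fuel
      else if value1 = 1 then
        solveLoopA length (decAt parties index1 1) total2 (results ++ [party index1]) fuel
      else
        solveLoopA length (decAt parties index1 2) total2
          (results ++ [party index1 ++ party index1]) fuel
    else results

-- the while loop runs at most total.toNat rounds on every input admitted by Pre_solve
def solve (parties : List Int) (length : Int) : List String :=
  let total := (PySem.List.pyRange 0 length 1).foldl
    (fun t index => t + PySem.List.pyGetD parties index 0) 0
  solveLoopA length parties total [] total.toNat

-- ===== PORT B =====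

-- chr(n); exact for the label codes that occur here (0 ≤ n < 0xD800)
def chrS (n : Int) : String := String.ofList [Char.ofNat n.toNat]

-- items[k][0] < item[0] or (items[k][0] == item[0] and items[k][1] < item[1])
def pairLtB (p item : Int × Int) : Bool :=
  p.1 < item.1 || (p.1 == item.1 && p.2 < item.2)

-- Source B's linear insertion into the ordered list (the while-k scan, structurally)
def put (item : Int × Int) : List (Int × Int) → List (Int × Int)
  | [] => [item]
  | x :: xs => if pairLtB x item then x :: put item xs else item :: x :: xs

-- k-th best party: (count, index) of items[k] if it exists and has seats left, else (0, -1)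
def top (items : List (Int × Int)) (k : Nat) : Int × Int :=
  match items[k]? with
  | some p => if p.1 < 0 then (-p.1, p.2) else (0, -1)
  | none => (0, -1)

def solveLoopB (items : List (Int × Int)) (total : Int) (out : List String) :
    Nat → List String
  | 0 => out
  | fuel + 1 =>
    if total > 0 then
      let t1 := top items 0
      let t2 := top items 1
      let v1 := t1.1
      let i1 := t1.2
      let v2 := t2.1
      let i2 := t2.2
      let total' := total - (if i1 ≠ -1 then 1 else 0) - (if i2 ≠ -1 then 1 else 0)
      if total' = 1 then
        solveLoopB (put (1 - v1, i1) (items.drop 1)) total' (out ++ [chrS (65 + i1)]) fuel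
      else if v1 = v2 then
        solveLoopB (put (1 - v1, i1) (put (1 - v2, i2) (items.drop 2))) total'
          (out ++ [chrS (65 + i1) ++ chrS (65 + i2)]) fuel
      else if v1 = 1 then
        solveLoopB (put (1 - v1, i1) (items.drop 1)) total' (out ++ [chrS (65 + i1)]) fuel
      else
        solveLoopB (put (2 - v1, i1) (items.drop 1)) total'
          (out ++ [chrS (65 + i1) ++ chrS (65 + i1)]) fuel
    else out

def solve_alt (parties : List Int) (length : Int) : List String :=
  let st := (PySem.List.pyRange 0 length 1).foldl
    (fun (st : Int × List (Int × Int)) i =>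
      (st.1 + PySem.List.pyGetD parties i 0,
       put (-(PySem.List.pyGetD parties i 0), i) st.2))
    (0, [])
  solveLoopB st.2 st.1 [] st.1.toNat

-- ===== PRECONDITION & SPEC =====
-- Pre_solve admits exactly the inputs on which A returns: length ≤ len(parties) (beyond it A's
-- indexing raises IndexError), and the sum/positive-seat balance under which A's while loop
-- reaches total ≤ 0 (otherwise A loops forever: with t = sum of the first `length` entries and
-- pos the positive ones among them, A terminates iff t ≤ 0, or pos = [v] with t ≤ v/2 + 1, or
-- |pos| ≥ 2 with t ≤ 2*(sum pos / 2) + 1).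
def Pre_solve (parties : List Int) (length : Int) : Prop :=
  length ≤ (parties.length : Int) ∧
  (let p := parties.take length.toNat
   let t := p.sum
   let pos := p.filter (fun v => 0 < v)
   t ≤ 0 ∨ (pos.length = 1 ∧ t ≤ pos.sum / 2 + 1) ∨
     (2 ≤ pos.length ∧ t ≤ 2 * (pos.sum / 2) + 1))
instance (parties : List Int) (length : Int) : Decidable (Pre_solve parties length) := by
  unfold Pre_solve; infer_instance

def pvWitness_solve : List Int × Int := ([3, 2, 2], 3)

def Spec_solve (parties : List Int) (length : Int) (out : List String) : Prop := out = solve_alt parties length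
instance (parties : List Int) (length : Int) (out : List String) : Decidable (Spec_solve parties length out) := by unfold Spec_solve; infer_instance

-- ===== CLAIM (what is proved, stated in full; the proofs are below) =====
def Claim_equal_solve : Prop := ∀ (parties : List Int) (length : Int), Dom_solve parties length → Pre_solve parties length → Spec_solve parties length (solve parties length)

-- ===== LEMMAS AND PROOFS =====

-- proof-side reformulation of A's argmax scan
def gstep (vals : List Int) (e : Int) (st : Int × Int) (index : Int) : Int × Int :=
  if index ≠ e ∧ st.1 < PySem.List.pyGetD vals index 0
  then (PySem.List.pyGetD vals index 0, index) else st

def gfold (vals : List Int) (e : Int) (n : Nat) : Int × Int :=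
  (PySem.List.pyRange 0 (n : Int) 1).foldl (gstep vals e) (0, -1)

-- the ordered pair list B maintains, as a function of A's current values
def pe (vals : List Int) (k : Nat) : Int × Int :=
  (-(PySem.List.pyGetD vals (k : Int) 0), (k : Int))

def E (vals : List Int) (n : Nat) : List (Int × Int) := (List.range n).map (pe vals)

-- strict order on pairs (Python tuple <, as a Prop)
def ltp (p q : Int × Int) : Prop := p.1 < q.1 ∨ (p.1 = q.1 ∧ p.2 < q.2)

theorem getMaxIndex_eq_gfold (vals : List Int) (length e : Int) (h0 : 0 ≤ length) :
    getMaxIndex vals length e = (gfold vals e length.toNat).2 := by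
  unfold getMaxIndex gfold gstep
  rw [Int.toNat_of_nonneg h0]

theorem gfold_succ (vals : List Int) (e : Int) (n : Nat) :
    gfold vals e (n + 1) = gstep vals e (gfold vals e n) (n : Int) := by
  unfold gfold
  rw [show ((n + 1 : Nat) : Int) = (n : Int) + 1 by push_cast; ring,
    PySem.List.pyRange_one_succ_right (by positivity), List.foldl_append]
  rfl

theorem gfold_zero (vals : List Int) (e : Int) : gfold vals e 0 = (0, -1) := by
  unfold gfold
  rw [PySem.List.pyRange_one_eq_nil (by simp)]
  rfl

-- invariant: the state is (0,-1) or stores a scanned, non-excluded index with a positive value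
theorem gfold_inv (vals : List Int) (e : Int) (n : Nat) :
    gfold vals e n = (0, -1) ∨
      (0 ≤ (gfold vals e n).2 ∧ (gfold vals e n).2 < (n : Int) ∧ (gfold vals e n).2 ≠ e ∧
       (gfold vals e n).1 = PySem.List.pyGetD vals (gfold vals e n).2 0 ∧
       0 < (gfold vals e n).1) := by
  induction n with
  | zero => left; exact gfold_zero vals e
  | succ n ih =>
    rw [gfold_succ]
    unfold gstep
    split_ifs with h
    · right
      have hpos0 : 0 ≤ (gfold vals e n).1 := by
        rcases ih with h' | ⟨_, _, _, _, h5⟩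
        · rw [h']
        · omega
      refine ⟨by positivity, by push_cast; omega, h.1, rfl, by omega⟩
    · rcases ih with h' | ⟨h1, h2, h3, h4, h5⟩
      · left; rw [h']
      · right
        exact ⟨h1, by push_cast at h2 ⊢; omega, h3, h4, h5⟩

-- the maximum dominates every scanned, non-excluded value
theorem gfold_ge (vals : List Int) (e : Int) (n : Nat) :
    ∀ k : Nat, k < n → (k : Int) ≠ e →
      PySem.List.pyGetD vals (k : Int) 0 ≤ (gfold vals e n).1 := by
  induction n with
  | zero => intro k hk; omega
  | succ n ih =>
    intro k hk hke
    rw [gfold_succ]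
    unfold gstep
    split_ifs with h
    · simp only
      by_cases hkn : k < n
      · have := ih k hkn hke
        omega
      · have hkeq : (k : Int) = (n : Int) := by omega
        rw [hkeq]
    · by_cases hkn : k < n
      · exact ih k hkn hke
      · simp only [not_and, not_lt] at h
        have hkeq : (k : Int) = (n : Int) := by omega
        rw [hkeq]
        exact h (by rw [← hkeq]; exact hke)

-- first maximizer: no earlier scanned index attains the (positive) maximum
theorem gfold_min (vals : List Int) (e : Int) (n : Nat) :
    ∀ k : Nat, k < n → (k : Int) ≠ e →
      PySem.List.pyGetD vals (k : Int) 0 = (gfold vals e n).1 →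
      0 < (gfold vals e n).1 → (gfold vals e n).2 ≤ (k : Int) := by
  induction n with
  | zero => intro k hk; omega
  | succ n ih =>
    intro k hk hke hval hpos
    rw [gfold_succ] at hval hpos ⊢
    unfold gstep at hval hpos ⊢
    split_ifs at hval hpos ⊢ with h
    · simp only at hval hpos ⊢
      by_cases hkn : k < n
      · have hle := gfold_ge vals e n k hkn hke
        omega
      · omega
    · by_cases hkn : k < n
      · exact ih k hkn hke hval hpos
      · simp only [not_and, not_lt] at h
        have hne : (n : Int) ≠ e := by
          have : (k : Int) = (n : Int) := by omega
          omega
        have hle := h hne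
        rcases gfold_inv vals e n with h' | ⟨h1, h2, _, _, _⟩
        · rw [h'] at hpos; simp at hpos
        · omega

-- the spec pins gfold down
theorem gfold_eq_of (vals : List Int) (e : Int) (n : Nat) (v i : Int)
    (hi0 : 0 ≤ i) (hin : i < (n : Int)) (hie : i ≠ e)
    (hv : PySem.List.pyGetD vals i 0 = v) (hpos : 0 < v)
    (hmax : ∀ k : Nat, k < n → (k : Int) ≠ e → PySem.List.pyGetD vals (k : Int) 0 ≤ v)
    (hmin : ∀ k : Nat, k < n → (k : Int) ≠ e →
      PySem.List.pyGetD vals (k : Int) 0 = v → i ≤ (k : Int)) :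
    gfold vals e n = (v, i) := by
  have hge := gfold_ge vals e n i.toNat (by omega) (by rw [Int.toNat_of_nonneg hi0]; exact hie)
  rw [Int.toNat_of_nonneg hi0, hv] at hge
  rcases gfold_inv vals e n with h' | ⟨h1, h2, h3, h4, h5⟩
  · rw [h'] at hge; simp at hge; omega
  · have hgn : ((gfold vals e n).2).toNat < n := by omega
    have hcast : ((((gfold vals e n).2).toNat : Nat) : Int) = (gfold vals e n).2 := by omega
    have hle := hmax ((gfold vals e n).2).toNat hgn (by rw [hcast]; exact h3)
    rw [hcast, ← h4] at hle
    have hveq : (gfold vals e n).1 = v := by omega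
    have hmin1 := hmin ((gfold vals e n).2).toNat hgn (by rw [hcast]; exact h3)
      (by rw [hcast, ← h4]; exact hveq)
    rw [hcast] at hmin1
    have hmin2 := gfold_min vals e n i.toNat (by omega)
      (by rw [Int.toNat_of_nonneg hi0]; exact hie)
      (by rw [Int.toNat_of_nonneg hi0, hv]; omega) (by omega)
    rw [Int.toNat_of_nonneg hi0] at hmin2
    have h6 : (gfold vals e n).2 = i := by omega
    rw [Prod.ext_iff]
    exact ⟨hveq, h6⟩

theorem gfold_none (vals : List Int) (e : Int) (n : Nat)
    (h : ∀ k : Nat, k < n → (k : Int) ≠ e → PySem.List.pyGetD vals (k : Int) 0 ≤ 0) :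
    gfold vals e n = (0, -1) := by
  rcases gfold_inv vals e n with h' | ⟨h1, h2, h3, h4, h5⟩
  · exact h'
  · exfalso
    have hgn : ((gfold vals e n).2).toNat < n := by omega
    have hcast : ((((gfold vals e n).2).toNat : Nat) : Int) = (gfold vals e n).2 := by omega
    have := h ((gfold vals e n).2).toNat hgn (by rw [hcast]; exact h3)
    rw [hcast, ← h4] at this
    omega

-- ltp basics
theorem ltp_iff (p q : Int × Int) : pairLtB p q = true ↔ ltp p q := by
  unfold pairLtB ltp
  constructor
  · intro h
    simp only [Bool.or_eq_true, decide_eq_true_eq, Bool.and_eq_true, beq_iff_eq] at h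
    tauto
  · intro h
    simp only [Bool.or_eq_true, decide_eq_true_eq, Bool.and_eq_true, beq_iff_eq]
    tauto

theorem ltp_trans {p q r : Int × Int} (h1 : ltp p q) (h2 : ltp q r) : ltp p r := by
  unfold ltp at *
  rcases h1 with h1 | ⟨h1a, h1b⟩ <;> rcases h2 with h2 | ⟨h2a, h2b⟩ <;>
    first | (left; omega) | (right; omega)

theorem ltp_of_not (p q : Int × Int) (h : ¬ ltp q p) (hne : p ≠ q) : ltp p q := by
  unfold ltp at *
  rcases p with ⟨a, b⟩; rcases q with ⟨c, d⟩
  have hne' : ¬(a = c ∧ b = d) := by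
    intro hx
    exact hne (by simp [hx.1, hx.2])
  simp only [not_or, not_and, not_lt] at h
  by_cases hac : a = c
  · right
    refine ⟨hac, ?_⟩
    have h2 := h.2 hac.symm
    have h3 : ¬ b = d := fun hb => hne' ⟨hac, hb⟩
    omega
  · left
    have := h.1
    omega

-- put basics
theorem put_perm (x : Int × Int) (l : List (Int × Int)) : (put x l).Perm (x :: l) := by
  induction l with
  | nil => exact List.Perm.refl _
  | cons h t ih =>
    unfold put
    split_ifs
    · exact ((ih.cons h).trans (List.Perm.swap x h t)).symm.symm
    · exact List.Perm.refl _

theorem mem_put {x y : Int × Int} {l : List (Int × Int)} :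
    y ∈ put x l ↔ y = x ∨ y ∈ l := by
  rw [(put_perm x l).mem_iff]
  simp

theorem put_pairwise (x : Int × Int) (l : List (Int × Int))
    (hl : l.Pairwise ltp) (hx : ∀ y ∈ l, x ≠ y) : (put x l).Pairwise ltp := by
  induction l with
  | nil => exact List.pairwise_singleton ltp x
  | cons h t ih =>
    rcases hl with _ | ⟨hh, ht⟩
    unfold put
    split_ifs with hcmp
    · refine List.Pairwise.cons ?_ (ih ht (fun y hy => hx y (List.mem_cons_of_mem h hy)))
      intro y hy
      rcases mem_put.mp hy with rfl | hy
      · exact (ltp_iff h y).mp hcmp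
      · exact hh y hy
    · refine List.Pairwise.cons ?_ (List.Pairwise.cons hh ht)
      intro y hy
      have hxh : ltp x h := ltp_of_not x h (fun hc => hcmp ((ltp_iff h x).mpr hc))
        (fun hc => hx h (List.mem_cons_self) hc)
      rcases List.mem_cons.mp hy with rfl | hy
      · exact hxh
      · exact ltp_trans hxh (hh y hy)

-- E basics
theorem mem_E {vals : List Int} {n : Nat} {y : Int × Int} :
    y ∈ E vals n ↔ ∃ k : Nat, k < n ∧ y = pe vals k := by
  unfold E
  simp only [List.mem_map, List.mem_range]
  tauto

theorem E_snd_pairwise (vals : List Int) (n : Nat) :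
    (E vals n).Pairwise (fun p q => p.2 < q.2) := by
  unfold E
  refine List.Pairwise.map (pe vals) ?_ List.pairwise_lt_range
  intro a b hab
  unfold pe
  simpa using hab

theorem E_snd_inj {vals : List Int} {n : Nat} {y z : Int × Int}
    (hy : y ∈ E vals n) (hz : z ∈ E vals n) (h : y.2 = z.2) : y = z := by
  rcases mem_E.mp hy with ⟨k, hk, rfl⟩
  rcases mem_E.mp hz with ⟨m, hm, rfl⟩
  unfold pe at h ⊢
  simp only at h
  have : k = m := by exact_mod_cast h
  subst this
  rfl

theorem E_nodup (vals : List Int) (n : Nat) : (E vals n).Nodup := by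
  have := E_snd_pairwise vals n
  refine List.Pairwise.imp ?_ this
  intro a b hab hc
  subst hc
  omega

theorem length_E (vals : List Int) (n : Nat) : (E vals n).length = n := by
  unfold E
  simp

-- the head of the ordered list is A's first argmax
theorem top_zero_eq (items : List (Int × Int)) (vals : List Int) (n : Nat)
    (hperm : items.Perm (E vals n)) (hpw : items.Pairwise ltp) :
    top items 0 = gfold vals (-1) n := by
  cases items with
  | nil =>
    have hE : (E vals n).length = 0 := by rw [← hperm.length_eq]; rfl
    rw [length_E] at hE
    subst hE
    rw [gfold_zero]
    rfl
  | cons p t =>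
    have hmemp : p ∈ E vals n := hperm.mem_iff.mp List.mem_cons_self
    obtain ⟨k, hk, hpk⟩ := mem_E.mp hmemp
    have hhead : ∀ y ∈ E vals n, y = p ∨ ltp p y := by
      intro y hy
      rcases List.mem_cons.mp (hperm.mem_iff.mpr hy) with h | hyt
      · left; exact h
      · right; exact (List.pairwise_cons.mp hpw).1 y hyt
    have hp1 : p.1 = -(PySem.List.pyGetD vals (k : Int) 0) := by rw [hpk]; rfl
    have hp2 : p.2 = (k : Int) := by rw [hpk]; rfl
    by_cases hneg : p.1 < 0
    · have htop : top (p :: t) 0 = (-p.1, p.2) := by simp [top, hneg]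
      rw [htop]
      refine (gfold_eq_of vals (-1) n (-p.1) p.2 (by omega) (by omega) (by omega)
        (by rw [hp2, hp1]; omega) (by omega) ?_ ?_).symm
      · intro m hm hme
        rcases hhead (pe vals m) (mem_E.mpr ⟨m, hm, rfl⟩) with h | h
        · have h1 := congrArg Prod.fst h
          unfold pe at h1
          simp only at h1
          omega
        · unfold ltp pe at h
          simp only at h
          omega
      · intro m hm hme hval
        rcases hhead (pe vals m) (mem_E.mpr ⟨m, hm, rfl⟩) with h | h
        · have h2 := congrArg Prod.snd h
          unfold pe at h2
          simp only at h2
          omega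
        · unfold ltp pe at h
          simp only at h
          omega
    · have htop : top (p :: t) 0 = (0, -1) := by simp [top, hneg]
      rw [htop]
      refine (gfold_none vals (-1) n ?_).symm
      intro m hm hme
      rcases hhead (pe vals m) (mem_E.mpr ⟨m, hm, rfl⟩) with h | h
      · have h1 := congrArg Prod.fst h
        unfold pe at h1
        simp only at h1
        omega
      · unfold ltp pe at h
        simp only at h
        omega

-- the second element is A's second argmax (excluding the first)
theorem top_one_eq (items : List (Int × Int)) (vals : List Int) (n : Nat)
    (hperm : items.Perm (E vals n)) (hpw : items.Pairwise ltp) :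
    top items 1 = gfold vals ((top items 0).2) n := by
  cases items with
  | nil =>
    have hE : (E vals n).length = 0 := by rw [← hperm.length_eq]; rfl
    rw [length_E] at hE
    subst hE
    rw [gfold_zero]
    rfl
  | cons p t =>
    have hmemp : p ∈ E vals n := hperm.mem_iff.mp List.mem_cons_self
    obtain ⟨k, hk, hpk⟩ := mem_E.mp hmemp
    have hp1 : p.1 = -(PySem.List.pyGetD vals (k : Int) 0) := by rw [hpk]; rfl
    have hp2 : p.2 = (k : Int) := by rw [hpk]; rfl
    cases t with
    | nil =>
      have hE : E vals n = [p] := List.perm_singleton.mp hperm.symm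
      have htop1 : top [p] 1 = (0, -1) := rfl
      rw [htop1]
      by_cases hneg : p.1 < 0
      · have htop0 : top [p] 0 = (-p.1, p.2) := by simp [top, hneg]
        rw [htop0]
        refine (gfold_none vals p.2 n ?_).symm
        intro m hm hme
        have : pe vals m ∈ E vals n := mem_E.mpr ⟨m, hm, rfl⟩
        rw [hE] at this
        have h1 := congrArg Prod.snd (List.mem_singleton.mp this)
        unfold pe at h1
        simp only at h1
        omega
      · have htop0 : top [p] 0 = (0, -1) := by simp [top, hneg]
        rw [htop0]
        refine (gfold_none vals (-1) n ?_).symm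
        intro m hm hme
        have : pe vals m ∈ E vals n := mem_E.mpr ⟨m, hm, rfl⟩
        rw [hE] at this
        have h1 := congrArg Prod.fst (List.mem_singleton.mp this)
        unfold pe at h1
        simp only at h1
        omega
    | cons q t =>
      have hmemq : q ∈ E vals n := hperm.mem_iff.mp (List.mem_cons_of_mem p List.mem_cons_self)
      obtain ⟨m2, hm2, hqk⟩ := mem_E.mp hmemq
      have hq1 : q.1 = -(PySem.List.pyGetD vals (m2 : Int) 0) := by rw [hqk]; rfl
      have hq2 : q.2 = (m2 : Int) := by rw [hqk]; rfl
      have hpq : ltp p q := (List.pairwise_cons.mp hpw).1 q List.mem_cons_self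
      have hsne : p.2 ≠ q.2 := by
        intro hc
        have := E_snd_inj hmemp hmemq hc
        subst this
        unfold ltp at hpq
        omega
      have hhead2 : ∀ y ∈ E vals n, y = p ∨ y = q ∨ ltp q y := by
        intro y hy
        rcases List.mem_cons.mp (hperm.mem_iff.mpr hy) with h | hyt
        · left; exact h
        · rcases List.mem_cons.mp hyt with h | hyt2
          · right; left; exact h
          · right; right
            exact (List.pairwise_cons.mp (List.pairwise_cons.mp hpw).2).1 y hyt2
      by_cases hneg : p.1 < 0
      · have htop0 : top (p :: q :: t) 0 = (-p.1, p.2) := by simp [top, hneg]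
        rw [htop0]
        by_cases hneg2 : q.1 < 0
        · have htop1 : top (p :: q :: t) 1 = (-q.1, q.2) := by simp [top, hneg2]
          rw [htop1]
          refine (gfold_eq_of vals p.2 n (-q.1) q.2 (by omega) (by omega) (fun h => hsne h.symm)
            (by rw [hq2, hq1]; omega) (by omega) ?_ ?_).symm
          · intro m hm hme
            rcases hhead2 (pe vals m) (mem_E.mpr ⟨m, hm, rfl⟩) with h | h | h
            · have h2 := congrArg Prod.snd h
              unfold pe at h2
              simp only at h2
              exact absurd h2 hme
            · have h1 := congrArg Prod.fst h
              unfold pe at h1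
              simp only at h1
              omega
            · unfold ltp pe at h
              simp only at h
              omega
          · intro m hm hme hval
            rcases hhead2 (pe vals m) (mem_E.mpr ⟨m, hm, rfl⟩) with h | h | h
            · have h2 := congrArg Prod.snd h
              unfold pe at h2
              simp only at h2
              exact absurd h2 hme
            · have h2 := congrArg Prod.snd h
              unfold pe at h2
              simp only at h2
              omega
            · unfold ltp pe at h
              simp only at h
              omega
        · have htop1 : top (p :: q :: t) 1 = (0, -1) := by simp [top, hneg2]
          rw [htop1]
          refine (gfold_none vals p.2 n ?_).symm
          intro m hm hme
          rcases hhead2 (pe vals m) (mem_E.mpr ⟨m, hm, rfl⟩) with h | h | h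
          · have h2 := congrArg Prod.snd h
            unfold pe at h2
            simp only at h2
            exact absurd h2 hme
          · have h1 := congrArg Prod.fst h
            unfold pe at h1
            simp only at h1
            omega
          · unfold ltp pe at h
            simp only at h
            omega
      · have htop0 : top (p :: q :: t) 0 = (0, -1) := by simp [top, hneg]
        rw [htop0]
        have hq1nn : ¬ q.1 < 0 := by
          unfold ltp at hpq
          omega
        have htop1 : top (p :: q :: t) 1 = (0, -1) := by simp [top, hq1nn]
        rw [htop1]
        refine (gfold_none vals (-1) n ?_).symm
        intro m hm hme
        rcases hhead2 (pe vals m) (mem_E.mpr ⟨m, hm, rfl⟩) with h | h | h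
        · have h1 := congrArg Prod.fst h
          unfold pe at h1
          simp only at h1
          omega
        · have h1 := congrArg Prod.fst h
          unfold pe at h1
          simp only at h1
          omega
        · unfold ltp pe at h
          simp only at h
          omega

-- replacing one in-range entry of vals replaces one pair of E
theorem E_set (vals : List Int) (n : Nat) (i : Nat) (hin : i < n) (hlen : i < vals.length)
    (w : Int) :
    (E (PySem.List.pySetD vals (i : Int) w) n).Perm
      ((-w, (i : Int)) :: (E vals n).erase (pe vals i)) := by
  have hmem : i ∈ List.range n := List.mem_range.mpr hin
  have hperm1 : (List.range n).Perm (i :: (List.range n).erase i) := List.perm_cons_erase hmem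
  have hmapcongr : ((List.range n).erase i).map (pe (PySem.List.pySetD vals (i : Int) w)) =
      ((List.range n).erase i).map (pe vals) := by
    apply List.map_congr_left
    intro m hm
    have hmne : m ≠ i := ((List.Nodup.mem_erase_iff (List.nodup_range)).mp hm).1
    unfold pe
    rw [PySem.List.pyGetD_pySetD_natCast vals i m w 0 hlen, if_neg hmne]
  have hpei : pe (PySem.List.pySetD vals (i : Int) w) i = (-w, (i : Int)) := by
    unfold pe
    rw [PySem.List.pyGetD_pySetD_natCast vals i i w 0 hlen, if_pos rfl]
  have h1 : (E (PySem.List.pySetD vals (i : Int) w) n).Perm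
      ((-w, (i : Int)) :: ((List.range n).erase i).map (pe vals)) := by
    unfold E
    have := hperm1.map (pe (PySem.List.pySetD vals (i : Int) w))
    rw [List.map_cons, hpei, hmapcongr] at this
    exact this
  have h3 : (E vals n).Perm (pe vals i :: ((List.range n).erase i).map (pe vals)) := by
    unfold E
    have := hperm1.map (pe vals)
    rw [List.map_cons] at this
    exact this
  have h2 := h3.erase (pe vals i)
  rw [List.erase_cons_head] at h2
  exact h1.trans (h2.symm.cons _)

-- the stored value equals the entry at the stored index (with 0 for "absent")
theorem gfold_value (vals : List Int) (e : Int) (n : Nat) :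
    (if (gfold vals e n).2 ≠ -1 then PySem.List.pyGetD vals (gfold vals e n).2 0 else 0) =
      (gfold vals e n).1 := by
  rcases gfold_inv vals e n with h | ⟨h1, _, _, h4, _⟩
  · rw [h]; rfl
  · rw [if_pos (by omega), h4]

theorem decAt_length (xs : List Int) (i k : Int) :
    (decAt xs i k).length = xs.length := by
  unfold decAt
  exact PySem.List.length_pySetD xs i _

theorem party_eq_chrS (i : Int) : party i = chrS (65 + i) := rfl

-- decrementing any entry keeps a non-positive prefix non-positive
theorem decAt_nonpos (xs : List Int) (n : Nat) (i : Int) (m : Int) (hm : 0 ≤ m)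
    (h : ∀ k : Nat, k < n → PySem.List.pyGetD xs (k : Int) 0 ≤ 0) :
    ∀ k : Nat, k < n → PySem.List.pyGetD (decAt xs i m) (k : Int) 0 ≤ 0 := by
  intro k hk
  unfold decAt PySem.List.pySetD PySem.List.pySet?
  cases hidx : PySem.List.pyIdx? xs.length i with
  | none =>
    simp only [Option.map_none, Option.getD_none]
    exact h k hk
  | some j =>
    have hj : j < xs.length := by
      unfold PySem.List.pyIdx? at hidx
      split_ifs at hidx with h1 h2 h3 <;> simp only [Option.some.injEq] at hidx <;> omega
    have hval : PySem.List.pyGetD xs i 0 = (xs[j]?).getD 0 := by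
      unfold PySem.List.pyGetD PySem.List.pyGet?
      rw [hidx]
      rfl
    simp only [Option.map_some, Option.getD_some]
    rw [PySem.List.pyGetD_natCast, List.getD_eq_getElem?_getD]
    by_cases hkj : k = j
    · subst hkj
      rw [List.getElem?_set_self hj]
      have hpd := h k hk
      rw [PySem.List.pyGetD_natCast, List.getD_eq_getElem?_getD] at hpd
      rw [hval]
      rw [List.getElem?_eq_getElem hj] at *
      simp only [Option.getD_some] at *
      omega
    · rw [List.getElem?_set_ne (Ne.symm hkj)]
      have hpd := h k hk
      rw [PySem.List.pyGetD_natCast, List.getD_eq_getElem?_getD] at hpd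
      exact hpd

-- degenerate regime: no positive seats in the scanned prefix; both loops emit the
-- same token forever
theorem loop_eq_deg (n : Nat) : ∀ (fuel : Nat) (vals : List Int)
    (items : List (Int × Int)) (total : Int) (out : List String),
    (∀ k : Nat, k < n → PySem.List.pyGetD vals (k : Int) 0 ≤ 0) →
    (∀ y ∈ items, 0 ≤ y.1) →
    solveLoopA (n : Int) vals total out fuel = solveLoopB items total out fuel := by
  intro fuel
  induction fuel with
  | zero => intros; rfl
  | succ fuel ih =>
    intro vals items total out hA hB
    show (if total > 0 then _ else out) = (if total > 0 then _ else out)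
    by_cases ht : total > 0
    · rw [if_pos ht, if_pos ht]
      have hg1 : gfold vals (-1) n = (0, -1) := gfold_none _ _ _ (fun k hk _ => hA k hk)
      have hgm : getMaxIndex vals (n : Int) (-1) = -1 := by
        rw [getMaxIndex_eq_gfold vals _ _ (by positivity), Int.toNat_natCast, hg1]
      have ht0 : top items 0 = (0, -1) := by
        unfold top
        cases hi : items[0]? with
        | none => rfl
        | some p =>
          have hp := hB p (List.mem_of_getElem? hi)
          show (if p.1 < 0 then (-p.1, p.2) else ((0 : Int), (-1 : Int))) = (0, -1)
          rw [if_neg (by omega)]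
      have ht1 : top items 1 = (0, -1) := by
        unfold top
        cases hi : items[1]? with
        | none => rfl
        | some p =>
          have hp := hB p (List.mem_of_getElem? hi)
          show (if p.1 < 0 then (-p.1, p.2) else ((0 : Int), (-1 : Int))) = (0, -1)
          rw [if_neg (by omega)]
      simp only [hgm, ht0, ht1, party_eq_chrS]
      norm_num
      have hBd1 : ∀ y ∈ put ((1 : Int), (-1 : Int)) items.tail, 0 ≤ y.1 := by
        intro y hy
        rcases mem_put.mp hy with rfl | hy
        · norm_num
        · exact hB y (List.mem_of_mem_tail hy)
      have hBd2 : ∀ y ∈ put ((1 : Int), (-1 : Int))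
          (put ((1 : Int), (-1 : Int)) (items.drop 2)), 0 ≤ y.1 := by
        intro y hy
        rcases mem_put.mp hy with rfl | hy
        · norm_num
        · rcases mem_put.mp hy with rfl | hy2
          · norm_num
          · exact hB y (List.mem_of_mem_drop hy2)
      have hA1 : ∀ k : Nat, k < n →
          PySem.List.pyGetD (decAt vals (-1) 1) (k : Int) 0 ≤ 0 :=
        decAt_nonpos vals n (-1) 1 (by norm_num) hA
      have hA2 : ∀ k : Nat, k < n →
          PySem.List.pyGetD (decAt (decAt vals (-1) 1) (-1) 1) (k : Int) 0 ≤ 0 :=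
        decAt_nonpos _ n (-1) 1 (by norm_num) hA1
      split_ifs with hc1
      · exact ih (decAt vals (-1) 1) _ _ _ hA1 hBd1
      · exact ih (decAt (decAt vals (-1) 1) (-1) 1) _ _ _ hA2 hBd2
    · rw [if_neg ht, if_neg ht]


-- one decremented entry re-inserted: the invariant carries over
theorem step1_inv (vals : List Int) (n : Nat) (tail : List (Int × Int)) (p0 : Int × Int)
    (k1 : Nat) (m : Int) (hk1 : k1 < n) (hk1len : k1 < vals.length)
    (hp0 : p0 = pe vals k1)
    (htail : tail.Perm ((E vals n).erase p0)) (htailpw : tail.Pairwise ltp) :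
    (put (-(PySem.List.pyGetD vals (k1 : Int) 0 - m), (k1 : Int)) tail).Perm
      (E (decAt vals (k1 : Int) m) n) ∧
    (put (-(PySem.List.pyGetD vals (k1 : Int) 0 - m), (k1 : Int)) tail).Pairwise ltp := by
  have hset := E_set vals n k1 hk1 hk1len (PySem.List.pyGetD vals (k1 : Int) 0 - m)
  rw [← hp0] at hset
  constructor
  · refine (put_perm _ _).trans ?_
    refine ((htail.cons _).trans ?_)
    exact hset.symm
  · refine put_pairwise _ _ htailpw ?_
    intro y hy hc
    have hyE' : y ∈ (E vals n).erase p0 := htail.mem_iff.mp hy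
    have hyE : y ∈ E vals n := List.mem_of_mem_erase hyE'
    have hyk : y = pe vals k1 :=
      E_snd_inj hyE (mem_E.mpr ⟨k1, hk1, rfl⟩) (by rw [← hc]; rfl)
    rw [← hp0] at hyk
    rw [hyk] at hyE'
    exact (List.Nodup.not_mem_erase (E_nodup vals n)) hyE'

-- two decremented entries re-inserted: the invariant carries over
theorem step2_inv (vals : List Int) (n : Nat) (rest : List (Int × Int)) (p0 p1 : Int × Int)
    (k1 k2 : Nat) (hk1 : k1 < n) (hk1len : k1 < vals.length)
    (hk2 : k2 < n) (hk2len : k2 < vals.length) (hne : k2 ≠ k1)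
    (hp0 : p0 = pe vals k1) (hp1 : p1 = pe vals k2)
    (htail : (p1 :: rest).Perm ((E vals n).erase p0)) (hrestpw : rest.Pairwise ltp) :
    (put (-(PySem.List.pyGetD vals (k1 : Int) 0 - 1), (k1 : Int))
      (put (-(PySem.List.pyGetD vals (k2 : Int) 0 - 1), (k2 : Int)) rest)).Perm
        (E (decAt (decAt vals (k1 : Int) 1) (k2 : Int) 1) n) ∧
    (put (-(PySem.List.pyGetD vals (k1 : Int) 0 - 1), (k1 : Int))
      (put (-(PySem.List.pyGetD vals (k2 : Int) 0 - 1), (k2 : Int)) rest)).Pairwise ltp := by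
  have hv2' : PySem.List.pyGetD (decAt vals (k1 : Int) 1) (k2 : Int) 0 =
      PySem.List.pyGetD vals (k2 : Int) 0 := by
    unfold decAt
    rw [PySem.List.pyGetD_pySetD_natCast vals k1 k2 _ 0 hk1len, if_neg hne]
  have hset1 := E_set vals n k1 hk1 hk1len (PySem.List.pyGetD vals (k1 : Int) 0 - 1)
  rw [← hp0] at hset1
  have hk2len' : k2 < (decAt vals (k1 : Int) 1).length := by rw [decAt_length]; exact hk2len
  have hset2 := E_set (decAt vals (k1 : Int) 1) n k2 hk2 hk2len'
    (PySem.List.pyGetD (decAt vals (k1 : Int) 1) (k2 : Int) 0 - 1)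
  have hpe2 : pe (decAt vals (k1 : Int) 1) k2 = p1 := by
    unfold pe
    rw [hv2', hp1]
    rfl
  rw [hpe2, hv2'] at hset2
  have hrest : rest.Perm (((E vals n).erase p0).erase p1) :=
    (List.cons_perm_iff_perm_erase.mp htail).2
  have hp1mem : p1 ∈ (E vals n).erase p0 := (List.cons_perm_iff_perm_erase.mp htail).1
  have hne1 : (-(PySem.List.pyGetD vals (k1 : Int) 0 - 1), (k1 : Int)) ≠ p1 := by
    intro hc
    have := congrArg Prod.snd hc
    rw [hp1] at this
    unfold pe at this
    simp only at this
    exact hne (by exact_mod_cast this.symm)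
  have herase : ((E (decAt vals (k1 : Int) 1) n).erase p1).Perm
      ((-(PySem.List.pyGetD vals (k1 : Int) 0 - 1), (k1 : Int)) ::
        (((E vals n).erase p0).erase p1)) := by
    have := hset1.erase p1
    rw [List.erase_cons_tail (by simpa using hne1)] at this
    exact this
  have hdec2 : decAt (decAt vals (k1 : Int) 1) (k2 : Int) 1 =
      PySem.List.pySetD (decAt vals (k1 : Int) 1) (k2 : Int)
        (PySem.List.pyGetD vals (k2 : Int) 0 - 1) := by
    have hv2'' := hv2'
    unfold decAt at hv2'' ⊢
    rw [hv2'']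
  constructor
  · rw [hdec2]
    refine (put_perm _ _).trans ?_
    refine (((put_perm _ _).cons _).trans ?_)
    refine (List.Perm.trans ?_ (hset2.symm))
    refine (List.Perm.trans ?_ (herase.symm.cons _))
    exact ((hrest.cons _).cons _).trans (List.Perm.swap _ _ _)
  · have hpw2 : (put (-(PySem.List.pyGetD vals (k2 : Int) 0 - 1), (k2 : Int)) rest).Pairwise ltp := by
      refine put_pairwise _ _ hrestpw ?_
      intro y hy hc
      have hyE' : y ∈ ((E vals n).erase p0).erase p1 := hrest.mem_iff.mp hy
      have hyE : y ∈ E vals n := List.mem_of_mem_erase (List.mem_of_mem_erase hyE')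
      have hyk : y = pe vals k2 :=
        E_snd_inj hyE (mem_E.mpr ⟨k2, hk2, rfl⟩) (by rw [← hc]; rfl)
      rw [← hp1] at hyk
      rw [hyk] at hyE'
      exact (List.Nodup.not_mem_erase ((E_nodup vals n).erase p0)) hyE'
    refine put_pairwise _ _ hpw2 ?_
    intro y hy hc
    rcases mem_put.mp hy with rfl | hy2
    · have := congrArg Prod.snd hc
      simp only at this
      exact hne (by exact_mod_cast this.symm)
    · have hyE' : y ∈ ((E vals n).erase p0).erase p1 := hrest.mem_iff.mp hy2
      have hyE : y ∈ E vals n := List.mem_of_mem_erase (List.mem_of_mem_erase hyE')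
      have hyk : y = pe vals k1 :=
        E_snd_inj hyE (mem_E.mpr ⟨k1, hk1, rfl⟩) (by rw [← hc]; rfl)
      rw [← hp0] at hyk
      rw [hyk] at hyE'
      exact (List.Nodup.not_mem_erase (E_nodup vals n))
        (List.mem_of_mem_erase hyE')

-- main loop correspondence
theorem loop_eq (n : Nat) : ∀ (fuel : Nat) (vals : List Int)
    (items : List (Int × Int)) (total : Int) (out : List String),
    items.Perm (E vals n) → items.Pairwise ltp →
    solveLoopA (n : Int) vals total out fuel = solveLoopB items total out fuel := by
  intro fuel
  induction fuel with
  | zero => intros; rfl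
  | succ fuel ih =>
    intro vals items total out hperm hpw
    by_cases hdeg : ∀ k : Nat, k < n → PySem.List.pyGetD vals (k : Int) 0 ≤ 0
    · refine loop_eq_deg n (fuel + 1) vals items total out hdeg ?_
      intro y hy
      rcases mem_E.mp (hperm.mem_iff.mp hy) with ⟨k, hk, rfl⟩
      unfold pe
      simp only
      have := hdeg k hk
      omega
    · push Not at hdeg
      obtain ⟨kp, hkp, hkpos⟩ := hdeg
      have hg1pos : 0 < (gfold vals (-1) n).1 :=
        lt_of_lt_of_le hkpos (gfold_ge vals (-1) n kp hkp (by omega))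
      rcases gfold_inv vals (-1) n with hbad | ⟨hg1a, hg1b, hg1c, hg1d, -⟩
      · rw [hbad] at hg1pos; norm_num at hg1pos
      have ht0 := top_zero_eq items vals n hperm hpw
      have ht1 := top_one_eq items vals n hperm hpw
      rw [ht0] at ht1
      cases items with
      | nil =>
        exfalso
        have hlen0 : (E vals n).length = 0 := by rw [← hperm.length_eq]; rfl
        rw [length_E] at hlen0
        omega
      | cons p0 tail =>
      have hmemp0 : p0 ∈ E vals n := hperm.mem_iff.mp List.mem_cons_self
      obtain ⟨k1, hk1, hp0k⟩ := mem_E.mp hmemp0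
      have htopc : top (p0 :: tail) 0 =
          if p0.1 < 0 then (-p0.1, p0.2) else ((0 : Int), (-1 : Int)) := rfl
      have hp0neg : p0.1 < 0 := by
        by_contra hge
        rw [htopc, if_neg hge] at ht0
        have := congrArg Prod.fst ht0
        simp only at this
        omega
      have ht0c := ht0
      rw [htopc, if_pos hp0neg] at ht0
      have hv1 : -p0.1 = (gfold vals (-1) n).1 := by rw [← ht0]
      have hi1 : p0.2 = (gfold vals (-1) n).2 := by rw [← ht0]
      have hk1i : ((k1 : Nat) : Int) = (gfold vals (-1) n).2 := by
        rw [← hi1, hp0k]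
        rfl
      have hval1 : PySem.List.pyGetD vals (k1 : Int) 0 = (gfold vals (-1) n).1 := by
        rw [hk1i, ← hg1d]
      have hk1len : k1 < vals.length := by
        by_contra hge
        rw [PySem.List.pyGetD_natCast, List.getD_eq_getElem?_getD,
          List.getElem?_eq_none (by omega)] at hval1
        simp only [Option.getD_none] at hval1
        omega
      have htail : tail.Perm ((E vals n).erase p0) :=
        (List.cons_perm_iff_perm_erase.mp hperm).2
      have htailpw : tail.Pairwise ltp := (List.pairwise_cons.mp hpw).2
      show (if total > 0 then _ else out) = (if total > 0 then _ else out)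
      by_cases ht : total > 0
      swap
      · rw [if_neg ht, if_neg ht]
      rw [if_pos ht, if_pos ht]
      have hgm : ∀ e, getMaxIndex vals ((n : Nat) : Int) e = (gfold vals e n).2 := by
        intro e
        rw [getMaxIndex_eq_gfold vals _ e (by positivity), Int.toNat_natCast]
      have hne1 : (gfold vals (-1) n).2 ≠ -1 := by omega
      simp only [hgm, ht0c, ht1, gfold_value, ← hg1d, party_eq_chrS, List.drop_succ_cons,
        List.drop_zero, List.drop_one, if_pos hne1]
      have htot : (if (gfold vals ((gfold vals (-1) n).2) n).2 ≠ -1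
          then total - 1 - 1 else total - 1) =
          total - 1 - (if (gfold vals ((gfold vals (-1) n).2) n).2 ≠ -1 then 1 else 0) := by
        split_ifs <;> ring
      rw [htot]
      have hpair1 : ((1 : Int) - (gfold vals (-1) n).1, (gfold vals (-1) n).2) =
          (-(PySem.List.pyGetD vals (k1 : Int) 0 - 1), ((k1 : Nat) : Int)) := by
        rw [Prod.mk.injEq]
        constructor
        · rw [hval1]; ring
        · rw [hk1i]
      have hpair2 : ((2 : Int) - (gfold vals (-1) n).1, (gfold vals (-1) n).2) =
          (-(PySem.List.pyGetD vals (k1 : Int) 0 - 2), ((k1 : Nat) : Int)) := by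
        rw [Prod.mk.injEq]
        constructor
        · rw [hval1]; ring
        · rw [hk1i]
      by_cases hg2e : (gfold vals ((gfold vals (-1) n).2) n).2 ≠ -1
      · simp only [if_pos hg2e]
        split_ifs with hc1 hc2 hc3
        · rw [hpair1, ← hk1i]
          obtain ⟨hP, hW⟩ := step1_inv vals n tail p0 k1 1 hk1 hk1len hp0k htail htailpw
          exact ih _ _ _ _ hP hW
        · -- both tops positive and equal: the second argmax exists too
          have hg2pos : 0 < (gfold vals ((gfold vals (-1) n).2) n).1 := by omega
          rcases gfold_inv vals ((gfold vals (-1) n).2) n with hbad2 | ⟨hg2a, hg2b, hg2c, hg2d, -⟩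
          · rw [hbad2] at hg2pos; norm_num at hg2pos
          cases tail with
          | nil =>
            exfalso
            have : top (p0 :: ([] : List (Int × Int))) 1 = ((0 : Int), (-1 : Int)) := rfl
            rw [this] at ht1
            have := congrArg Prod.fst ht1
            simp only at this
            omega
          | cons p1 rest =>
          have hmemp1 : p1 ∈ E vals n :=
            hperm.mem_iff.mp (List.mem_cons_of_mem p0 List.mem_cons_self)
          obtain ⟨k2, hk2, hp1k⟩ := mem_E.mp hmemp1
          have htopc1 : top (p0 :: p1 :: rest) 1 =
              if p1.1 < 0 then (-p1.1, p1.2) else ((0 : Int), (-1 : Int)) := rfl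
          have hp1neg : p1.1 < 0 := by
            by_contra hge
            rw [htopc1, if_neg hge] at ht1
            have := congrArg Prod.fst ht1
            simp only at this
            omega
          rw [htopc1, if_pos hp1neg] at ht1
          have hi2 : p1.2 = (gfold vals ((gfold vals (-1) n).2) n).2 := by rw [← ht1]
          have hk2i : ((k2 : Nat) : Int) = (gfold vals ((gfold vals (-1) n).2) n).2 := by
            rw [← hi2, hp1k]
            rfl
          have hval2 : PySem.List.pyGetD vals (k2 : Int) 0 =
              (gfold vals ((gfold vals (-1) n).2) n).1 := by
            rw [hk2i, ← hg2d]
          have hk2len : k2 < vals.length := by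
            by_contra hge
            rw [PySem.List.pyGetD_natCast, List.getD_eq_getElem?_getD,
              List.getElem?_eq_none (by omega)] at hval2
            simp only [Option.getD_none] at hval2
            omega
          have hne21 : k2 ≠ k1 := by
            intro hc
            rw [hc, hk1i] at hk2i
            exact hg2c hk2i.symm
          have hpair2' : ((1 : Int) - (gfold vals ((gfold vals (-1) n).2) n).1,
              (gfold vals ((gfold vals (-1) n).2) n).2) =
              (-(PySem.List.pyGetD vals (k2 : Int) 0 - 1), ((k2 : Nat) : Int)) := by
            rw [Prod.mk.injEq]
            constructor
            · rw [hval2]; ring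
            · rw [hk2i]
          rw [hpair1, hpair2', ← hk2i, ← hk1i]
          simp only [List.tail_cons]
          have hrestpw : rest.Pairwise ltp := (List.pairwise_cons.mp htailpw).2
          obtain ⟨hP, hW⟩ := step2_inv vals n rest p0 p1 k1 k2 hk1 hk1len hk2 hk2len
            hne21 hp0k hp1k htail hrestpw
          exact ih _ _ _ _ hP hW
        · rw [hpair1, ← hk1i]
          obtain ⟨hP, hW⟩ := step1_inv vals n tail p0 k1 1 hk1 hk1len hp0k htail htailpw
          exact ih _ _ _ _ hP hW
        · rw [hpair2, ← hk1i]
          obtain ⟨hP, hW⟩ := step1_inv vals n tail p0 k1 2 hk1 hk1len hp0k htail htailpw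
          exact ih _ _ _ _ hP hW

      · simp only [if_neg hg2e, sub_zero]
        split_ifs with hc1 hc2 hc3
        · rw [hpair1, ← hk1i]
          obtain ⟨hP, hW⟩ := step1_inv vals n tail p0 k1 1 hk1 hk1len hp0k htail htailpw
          exact ih _ _ _ _ hP hW
        · exfalso
          rcases gfold_inv vals ((gfold vals (-1) n).2) n with hb | ⟨h2a, -, -, -, -⟩
          · have hb1 := congrArg Prod.fst hb
            simp only at hb1
            omega
          · exact hg2e (by omega)
        · rw [hpair1, ← hk1i]
          obtain ⟨hP, hW⟩ := step1_inv vals n tail p0 k1 1 hk1 hk1len hp0k htail htailpw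
          exact ih _ _ _ _ hP hW
        · rw [hpair2, ← hk1i]
          obtain ⟨hP, hW⟩ := step1_inv vals n tail p0 k1 2 hk1 hk1len hp0k htail htailpw
          exact ih _ _ _ _ hP hW

-- B's build loop produces the ordered list of all pairs
theorem build_inv (vals : List Int) (n : Nat) :
    ((PySem.List.pyRange 0 (n : Int) 1).foldl
      (fun acc i => put (-(PySem.List.pyGetD vals i 0), i) acc) []).Perm (E vals n) ∧
    ((PySem.List.pyRange 0 (n : Int) 1).foldl
      (fun acc i => put (-(PySem.List.pyGetD vals i 0), i) acc) []).Pairwise ltp := by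
  induction n with
  | zero =>
    rw [PySem.List.pyRange_one_eq_nil (by simp)]
    exact ⟨List.Perm.refl _, List.Pairwise.nil⟩
  | succ n ih =>
    obtain ⟨hp, hw⟩ := ih
    rw [show ((n + 1 : Nat) : Int) = (n : Int) + 1 by push_cast; ring,
      PySem.List.pyRange_one_succ_right (by positivity), List.foldl_append,
      List.foldl_cons, List.foldl_nil]
    constructor
    · refine (put_perm _ _).trans ?_
      have hE : E vals (n + 1) = E vals n ++ [pe vals n] := by
        unfold E
        rw [List.range_succ, List.map_append]
        rfl
      rw [hE]
      exact (hp.cons (pe vals n)).trans (List.perm_append_singleton (pe vals n) (E vals n)).symm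
    · refine put_pairwise _ _ hw ?_
      intro y hy
      rcases mem_E.mp (hp.mem_iff.mp hy) with ⟨k, hk, rfl⟩
      intro hc
      have h2 := congrArg Prod.snd hc
      unfold pe at h2
      simp only at h2
      omega

-- ===== VERDICT (by name: the statement is the Claim_ definition above) =====
theorem solve_spec : Claim_equal_solve := by
  intro parties length _ hpre
  unfold Spec_solve solve solve_alt
  rw [PySem.List.foldl_prod_mk
    (f := fun t index => t + PySem.List.pyGetD parties index 0)
    (g := fun acc i => put (-(PySem.List.pyGetD parties i 0), i) acc)]
  by_cases h0 : 0 ≤ length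
  · have hn : length = ((length.toNat : Nat) : Int) := by omega
    rw [hn]
    obtain ⟨hp, hw⟩ := build_inv parties length.toNat
    exact loop_eq length.toNat _ parties _ _ [] hp hw
  · rw [PySem.List.pyRange_one_eq_nil (by omega)]
    rfl
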